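-- pv_equiv track=rewrite | github.com/rsprenkels/kattis | python/1_6/volim.py | volim
-- ===== SOURCE A (Python) =====
-- def volim(K, answers):
--     player = K # we use 1 based player numbering
--     remaining_time = 210
--     for index, answer in enumerate(answers):
--         time_used, answer_given = answer
--         remaining_time -= time_used
--         if remaining_time <= 0:
--             return player
--         if answer_given == 'T':
--             player += 1
--             if player == 9:
--                 player = 1
-- ===== SOURCE B (Python) =====
-- def volim(K, answers):
--     # Phase 1: find the index of the answer on which cumulative time reaches 210.
--     total = 0
--     stop = None
--     for i, (time_used, _) in enumerate(answers):
--         total += time_used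
--         if total >= 210:
--             stop = i
--             break
--     if stop is None:
--         return None
--     # Phase 2: count correct ('T') answers before that one, then advance the
--     # player that many rotation steps (after 8 comes 1).
--     num_T = sum(1 for _, a in answers[:stop] if a == 'T')
--     player = K
--     for _ in range(num_T):
--         player = 1 if player == 8 else player + 1
--     return player
-- ===== Notes on version B (the rewrite author's own statement) =====
-- stated objective: alternative
-- what changed: Replaces the lockstep time/rotation simulation with a two-phase decomposition: first find the answer index where cumulative time reaches 210, then count the 'T' answers before it and advance the player that many rotation steps.
import Mathlib
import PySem

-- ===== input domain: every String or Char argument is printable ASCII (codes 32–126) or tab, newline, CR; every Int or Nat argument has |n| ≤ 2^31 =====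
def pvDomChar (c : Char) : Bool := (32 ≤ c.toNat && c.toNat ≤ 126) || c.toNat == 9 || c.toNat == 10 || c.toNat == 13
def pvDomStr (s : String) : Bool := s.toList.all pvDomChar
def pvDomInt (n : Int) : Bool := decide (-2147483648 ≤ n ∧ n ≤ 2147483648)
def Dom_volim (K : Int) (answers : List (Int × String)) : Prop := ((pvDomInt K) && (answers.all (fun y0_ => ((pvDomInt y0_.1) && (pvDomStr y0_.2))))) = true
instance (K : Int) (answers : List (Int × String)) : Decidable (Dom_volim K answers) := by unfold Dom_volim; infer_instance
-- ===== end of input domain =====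

-- B replaces A's lockstep time/rotation simulation by a two-phase decomposition
-- (find the answer index where cumulative time reaches 210, then count the 'T'
-- answers before it and advance the player that many rotation steps); same cost,
-- alternative structure. Return-value equivalence is proved on all inputs.

-- ===== PORT A =====
def volimLoop (player : Int) (remaining : Int) : List (Int × String) → Option Int
  | [] => none
  | (time_used, answer_given) :: rest =>
    let remaining' := remaining - time_used
    if remaining' ≤ 0 then some player
    else
      let player' :=
        if answer_given = "T" then
          let p := player + 1
          if p = 9 then 1 else p
        else player
      volimLoop player' remaining' rest

def volim (K : Int) (answers : List (Int × String)) : Option Int :=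
  volimLoop K 210 answers

-- ===== PORT B =====
-- phase 1: first index i with cumulative time ≥ 210
def volimFindStop (total : Int) (i : Nat) : List (Int × String) → Option Nat
  | [] => none
  | (time_used, _) :: rest =>
    let total' := total + time_used
    if 210 ≤ total' then some i else volimFindStop total' (i + 1) rest

-- phase 2a: number of 'T' answers
def volimCountT : List (Int × String) → Nat
  | [] => 0
  | (_, a) :: rest => (if a = "T" then 1 else 0) + volimCountT rest

def volim_alt (K : Int) (answers : List (Int × String)) : Option Int :=
  match volimFindStop 0 0 answers with
  | none => none
  | some i =>
    let numT := volimCountT (answers.take i)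
    -- phase 2b: 'for _ in range(numT): player = 1 if player == 8 else player + 1'
    some ((List.range numT).foldl (fun player _ => if player = 8 then 1 else player + 1) K)

-- ===== PRECONDITION & SPEC =====
def Spec_volim (K : Int) (answers : List (Int × String)) (out : Option Int) : Prop := out = volim_alt K answers
instance (K : Int) (answers : List (Int × String)) (out : Option Int) : Decidable (Spec_volim K answers out) := by unfold Spec_volim; infer_instance

-- ===== CLAIM (what is proved, stated in full; the proofs are below) =====
def Claim_equal_volim : Prop := ∀ (K : Int) (answers : List (Int × String)), Dom_volim K answers → Spec_volim K answers (volim K answers)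

-- ===== LEMMAS AND PROOFS =====

-- A's per-'T' rotation folded over a list
def volimApplyT (p : Int) : List (Int × String) → Int
  | [] => p
  | (_, a) :: rest =>
    volimApplyT (if a = "T" then (if p + 1 = 9 then 1 else p + 1) else p) rest

-- iterate B's rotation step n times
def volimRotN : Nat → Int → Int
  | 0, p => p
  | n + 1, p => volimRotN n (if p = 8 then 1 else p + 1)

theorem volim_foldl_range_eq_rotN (n : Nat) : ∀ p : Int,
    (List.range n).foldl (fun player _ => if player = 8 then 1 else player + 1) p
      = volimRotN n p := by
  induction n with
  | zero => intro p; simp [volimRotN]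
  | succ m ih =>
    intro p
    rw [List.range_succ_eq_map]
    simp only [List.foldl_cons, List.foldl_map]
    exact ih _

theorem volimApplyT_eq_rotN (xs : List (Int × String)) : ∀ p : Int,
    volimApplyT p xs = volimRotN (volimCountT xs) p := by
  induction xs with
  | nil => intro p; simp [volimApplyT, volimCountT, volimRotN]
  | cons x rest ih =>
    intro p
    obtain ⟨t, a⟩ := x
    simp only [volimApplyT, volimCountT]
    by_cases hT : a = "T"
    · rw [if_pos hT, if_pos hT, ih]
      have hstep : (if p + 1 = 9 then (1 : Int) else p + 1) = (if p = 8 then 1 else p + 1) := by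
        split_ifs <;> omega
      rw [Nat.add_comm, hstep]
      rfl
    · rw [if_neg hT, if_neg hT, ih, Nat.zero_add]

theorem volimFindStop_shift (xs : List (Int × String)) : ∀ t i,
    volimFindStop t i xs = (volimFindStop t 0 xs).map (· + i) := by
  induction xs with
  | nil => intro t i; simp [volimFindStop]
  | cons x rest ih =>
    intro t i
    obtain ⟨u, a⟩ := x
    simp only [volimFindStop]
    split
    · simp
    · rw [ih, ih (t + u) 1]
      cases volimFindStop (t + u) 0 rest with
      | none => simp
      | some j => simp; omega

theorem volimLoop_eq (xs : List (Int × String)) : ∀ (r p : Int),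
    volimLoop p r xs =
      match volimFindStop (210 - r) 0 xs with
      | none => none
      | some i => some (volimApplyT p (xs.take i)) := by
  induction xs with
  | nil => intro r p; simp [volimLoop, volimFindStop]
  | cons x rest ih =>
    intro r p
    obtain ⟨u, a⟩ := x
    simp only [volimLoop, volimFindStop]
    by_cases hst : 210 ≤ 210 - r + u
    · rw [if_pos hst, if_pos (by omega : r - u ≤ 0)]
      simp [volimApplyT]
    · rw [if_neg hst, if_neg (by omega : ¬ r - u ≤ 0)]
      rw [volimFindStop_shift rest (210 - r + u) 1]
      have h210 : 210 - (r - u) = 210 - r + u := by ring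
      rw [ih (r - u), h210]
      cases volimFindStop (210 - r + u) 0 rest with
      | none => simp
      | some j => simp [volimApplyT]

-- ===== VERDICT (by name: the statement is the Claim_ definition above) =====
theorem volim_spec : Claim_equal_volim := by
  intro K answers _
  show volim K answers = volim_alt K answers
  rw [volim, volimLoop_eq]
  have h0 : (210 : Int) - 210 = 0 := by norm_num
  rw [h0, volim_alt]
  cases volimFindStop 0 0 answers with
  | none => rfl
  | some i => simp [volimApplyT_eq_rotN, volim_foldl_range_eq_rotN]
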